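-- pv_equiv track=rewrite | github.com/mkote/ocular | d606/preprocessing/dataextractor.py | trial_time_fixer
-- ===== SOURCE A (Python) =====
-- def trial_time_fixer(trial_list, matrix_length):
--     """
--     Used in Run combiner, to create a correct list of trial start points
--     :param trial_list: A list of Trial start times
--     :param matrix_length: list of matrix length for each run
--     :return: a new trial list
--     """
--     n_trial_list = []
--     trial_adder = 0
--     matrix_counter = 0
--     for i in range(1, len(trial_list)):
--         if trial_list[i] > trial_list[i - 1]:
--             n_trial_list.append(trial_list[i - 1] + trial_adder)
--         else:
--             n_trial_list.append(trial_list[i - 1] + trial_adder)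
--             trial_adder += matrix_length[matrix_counter]
--             matrix_counter += 1
--     n_trial_list.append(trial_list[-1] + trial_adder)
--     return n_trial_list
-- ===== SOURCE B (Python) =====
-- def _first_reset(trial_list):
--     for i in range(1, len(trial_list)):
--         if trial_list[i] <= trial_list[i - 1]:
--             return i
--     return None
--
--
-- def trial_time_fixer(trial_list, matrix_length):
--     """Recursive run-splitting: the prefix up to the first reset is returned
--     unchanged; the remaining runs are fixed recursively with the rest of
--     matrix_length and then shifted by the first run's matrix length."""
--     i = _first_reset(trial_list)
--     if i is None:
--         return list(trial_list)
--     rest = trial_time_fixer(trial_list[i:], matrix_length[1:])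
--     return trial_list[:i] + [t + matrix_length[0] for t in rest]
-- ===== Notes on version B (the rewrite author's own statement) =====
-- stated objective: alternative
-- what changed: A's single forward pass with a running offset/counter is replaced by a recursive run-splitting decomposition: find the first reset point, keep the prefix unchanged, recurse on the remaining runs with the rest of matrix_length, and shift that result by the first run's matrix length.
import Mathlib
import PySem

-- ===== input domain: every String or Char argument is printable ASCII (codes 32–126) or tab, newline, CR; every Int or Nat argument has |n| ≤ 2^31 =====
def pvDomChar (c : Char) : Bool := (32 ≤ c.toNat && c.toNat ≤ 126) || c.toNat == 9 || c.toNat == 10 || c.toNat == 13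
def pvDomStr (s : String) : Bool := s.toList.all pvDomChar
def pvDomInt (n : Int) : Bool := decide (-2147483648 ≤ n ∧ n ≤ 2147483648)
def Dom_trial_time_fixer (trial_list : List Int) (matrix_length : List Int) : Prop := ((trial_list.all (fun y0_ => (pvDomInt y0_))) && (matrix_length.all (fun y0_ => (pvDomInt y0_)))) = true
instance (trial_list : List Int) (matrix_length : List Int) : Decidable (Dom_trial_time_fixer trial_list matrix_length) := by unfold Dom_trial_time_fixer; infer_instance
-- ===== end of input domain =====

-- B replaces A's single accumulator pass by a recursive run-splitting decomposition (alternative objective, not faster); return values only (neither mutates).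


-- ===== PORT A =====
-- loop body of A: state (n_trial_list, trial_adder, matrix_counter), loop index i
def pvStepA (tl ml : List Int) (st : List Int × Int × Int) (i : Int) : List Int × Int × Int :=
  match st with
  | (acc, adder, counter) =>
    if PySem.List.pyGetD tl i 0 > PySem.List.pyGetD tl (i - 1) 0 then
      (acc ++ [PySem.List.pyGetD tl (i - 1) 0 + adder], adder, counter)
    else
      (acc ++ [PySem.List.pyGetD tl (i - 1) 0 + adder],
       adder + PySem.List.pyGetD ml counter 0, counter + 1)

def trial_time_fixer (trial_list : List Int) (matrix_length : List Int) : List Int :=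
  let st := (PySem.List.pyRange 1 (trial_list.length : Int) 1).foldl (pvStepA trial_list matrix_length) ([], 0, 0)
  st.1 ++ [PySem.List.pyGetD trial_list (-1) 0 + st.2.1]

-- ===== PORT B =====
-- `_first_reset`: first index i ≥ 1 with trial_list[i] <= trial_list[i-1] (for-loop with early return = find?)
def pvFirstReset (tl : List Int) : Option Int :=
  (PySem.List.pyRange 1 (tl.length : Int) 1).find?
    (fun i => decide (PySem.List.pyGetD tl i 0 ≤ PySem.List.pyGetD tl (i - 1) 0))

-- Source B's recursion; the fuel (= length of the list, strictly decreasing) only makes the same recursion structural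
def pvAltGo : Nat → List Int → List Int → List Int
  | 0, tl, _ => tl
  | fuel + 1, tl, ml =>
      match pvFirstReset tl with
      | none => tl
      | some i =>
          PySem.List.slice tl none (some i) ++
          (pvAltGo fuel (PySem.List.slice tl (some i) none)
              (PySem.List.slice ml (some 1) none)).map
            (· + PySem.List.pyGetD ml 0 0)

def trial_time_fixer_alt (trial_list : List Int) (matrix_length : List Int) : List Int :=
  pvAltGo trial_list.length trial_list matrix_length

-- ===== PRECONDITION & SPEC =====
-- Pre_ excludes exactly the inputs on which Python A raises IndexError: the empty
-- trial_list (trial_list[-1]) and inputs with more resets (non-increasing adjacent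
-- steps) than entries of matrix_length (matrix_length[matrix_counter] out of range).
def Pre_trial_time_fixer (trial_list : List Int) (matrix_length : List Int) : Prop :=
  trial_list ≠ [] ∧
  (List.zip trial_list trial_list.tail).countP (fun p => decide (p.2 ≤ p.1)) ≤ matrix_length.length
instance (trial_list : List Int) (matrix_length : List Int) : Decidable (Pre_trial_time_fixer trial_list matrix_length) := by unfold Pre_trial_time_fixer; infer_instance

def pvWitness_trial_time_fixer : List Int × List Int := ([0, 5, 2, 7], [10])

def Spec_trial_time_fixer (trial_list : List Int) (matrix_length : List Int) (out : List Int) : Prop := out = trial_time_fixer_alt trial_list matrix_length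
instance (trial_list : List Int) (matrix_length : List Int) (out : List Int) : Decidable (Spec_trial_time_fixer trial_list matrix_length out) := by unfold Spec_trial_time_fixer; infer_instance

-- ===== CLAIM (what is proved, stated in full; the proofs are below) =====
def Claim_equal_trial_time_fixer : Prop := ∀ (trial_list : List Int) (matrix_length : List Int), Dom_trial_time_fixer trial_list matrix_length → Pre_trial_time_fixer trial_list matrix_length → Spec_trial_time_fixer trial_list matrix_length (trial_time_fixer trial_list matrix_length)

-- ===== LEMMAS AND PROOFS =====

-- reference recursion shared by both proofs: A's loop state, structurally on the list, Nat matrix counter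
def pvRef (ml : List Int) : Int → List Int → Int → Nat → List Int
  | prev, [], adder, _ => [prev + adder]
  | prev, x :: xs, adder, c =>
      if prev < x then (prev + adder) :: pvRef ml x xs adder c
      else (prev + adder) :: pvRef ml x xs (adder + PySem.List.pyGetD ml (c : Int) 0) (c + 1)

lemma pvRef_shift (ml : List Int) (xs : List Int) : ∀ (prev adder g : Int) (c : Nat),
    pvRef ml prev xs (adder + g) c = (pvRef ml prev xs adder c).map (· + g) := by
  induction xs with
  | nil => intro prev adder g c; simp [pvRef]; ring
  | cons x xs ih =>
      intro prev adder g c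
      by_cases hlt : prev < x
      · simp only [pvRef, if_pos hlt, List.map_cons]
        rw [ih x adder g c]
        congr 1
        ring
      · simp only [pvRef, if_neg hlt, List.map_cons]
        rw [show adder + g + PySem.List.pyGetD ml (c:Int) 0
              = (adder + PySem.List.pyGetD ml (c:Int) 0) + g by ring,
            ih x (adder + PySem.List.pyGetD ml (c:Int) 0) g (c+1)]
        congr 1
        ring

lemma pvRef_counter (ml : List Int) (xs : List Int) : ∀ (prev adder : Int) (c : Nat),
    pvRef ml prev xs adder (c + 1) = pvRef ml.tail prev xs adder c := by
  induction xs with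
  | nil => intro prev adder c; simp [pvRef]
  | cons x xs ih =>
      intro prev adder c
      have hget : PySem.List.pyGetD ml (((c + 1 : Nat)) : Int) 0 = PySem.List.pyGetD ml.tail ((c : Nat) : Int) 0 := by
        cases ml with
        | nil => rw [PySem.List.pyGetD_natCast, PySem.List.pyGetD_natCast]; simp
        | cons m ms => rw [PySem.List.pyGetD_natCast, PySem.List.pyGetD_natCast]; simp [List.getD]
      by_cases hlt : prev < x
      · simp only [pvRef, if_pos hlt]
        rw [ih]
      · simp only [pvRef, if_neg hlt]
        rw [hget, ih]

-- A's fold, started anywhere in the list, computes pvRef of the remaining suffix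
lemma pvFoldA_ref (tl ml : List Int) : ∀ (rest : List Int) (k : Nat) (prev : Int)
    (acc : List Int) (adder : Int) (c : Nat),
    tl.drop k = prev :: rest →
    (((PySem.List.pyRange ((k : Int) + 1) (tl.length : Int) 1).foldl (pvStepA tl ml) (acc, adder, (c : Int))).1
      ++ [PySem.List.pyGetD tl (-1) 0 +
          ((PySem.List.pyRange ((k : Int) + 1) (tl.length : Int) 1).foldl (pvStepA tl ml) (acc, adder, (c : Int))).2.1])
      = acc ++ pvRef ml prev rest adder c := by
  intro rest
  induction rest with
  | nil =>
      intro k prev acc adder c hdrop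
      have hk : k < tl.length := by
        by_contra h
        rw [List.drop_eq_nil_of_le (by omega)] at hdrop
        simp at hdrop
      have hlen : tl.length = k + 1 := by
        have := congrArg List.length hdrop
        simp [List.length_drop] at this
        omega
      have hrange : PySem.List.pyRange ((k : Int) + 1) (tl.length : Int) 1 = [] := by
        apply PySem.List.pyRange_one_eq_nil
        omega
      have hne : tl ≠ [] := by
        intro h; rw [h] at hk; simp at hk
      have hlast : PySem.List.pyGetD tl (-1) 0 = prev := by
        rw [PySem.List.pyGetD_neg_one tl 0 hne]
        have h2 : (tl.drop k).getLast (by rw [hdrop]; simp) = tl.getLast hne := List.getLast_drop _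
        rw [← h2]
        simp [hdrop]
      rw [hrange]
      simp [pvRef, hlast]
  | cons x xs ih =>
      intro k prev acc adder c hdrop
      have hk1 : k + 1 < tl.length := by
        have := congrArg List.length hdrop
        simp [List.length_drop] at this
        omega
      have hdrop' : tl.drop (k + 1) = x :: xs := by
        have h3 : tl.drop (k + 1) = (tl.drop k).drop 1 := by
          rw [List.drop_drop]
        rw [h3, hdrop]; rfl
      have hgetk : PySem.List.pyGetD tl (k : Int) 0 = prev := by
        rw [PySem.List.pyGetD_natCast]
        have h4 : tl[k]? = some prev := by
          have := List.getElem?_drop (xs := tl) (i := k) (j := 0); rw [hdrop] at this; simpa using this.symm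
        simp [List.getD, h4]
      have hgetk1 : PySem.List.pyGetD tl ((k : Int) + 1) 0 = x := by
        have hcast : ((k : Int) + 1) = ((k + 1 : Nat) : Int) := by push_cast; ring
        rw [hcast, PySem.List.pyGetD_natCast]
        have h5 : tl[k + 1]? = some x := by
          have := List.getElem?_drop (xs := tl) (i := k+1) (j := 0); rw [hdrop'] at this; simpa using this.symm
        simp [List.getD, h5]
      have hcons : PySem.List.pyRange ((k : Int) + 1) (tl.length : Int) 1
          = ((k : Int) + 1) :: PySem.List.pyRange (((k + 1 : Nat) : Int) + 1) (tl.length : Int) 1 := by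
        rw [PySem.List.pyRange_one_cons (by exact_mod_cast hk1)]
        norm_num
      rw [hcons, List.foldl_cons]
      have hsub : ((k : Int) + 1 - 1) = (k : Int) := by ring
      by_cases hlt : prev < x
      · have hstep : pvStepA tl ml (acc, adder, ((c : Nat) : Int)) ((k : Int) + 1)
            = (acc ++ [prev + adder], adder, ((c : Nat) : Int)) := by
          simp only [pvStepA, hsub, hgetk, hgetk1, gt_iff_lt, if_pos hlt]
        rw [hstep, ih (k + 1) x (acc ++ [prev + adder]) adder c hdrop']
        simp [pvRef, hlt]
      · have hstep : pvStepA tl ml (acc, adder, ((c : Nat) : Int)) ((k : Int) + 1)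
            = (acc ++ [prev + adder], adder + PySem.List.pyGetD ml ((c : Nat) : Int) 0, ((c + 1 : Nat) : Int)) := by
          simp only [pvStepA, hsub, hgetk, hgetk1, gt_iff_lt, if_neg hlt]
          push_cast
          ring_nf
        rw [hstep, ih (k + 1) x (acc ++ [prev + adder]) (adder + PySem.List.pyGetD ml ((c : Nat) : Int) 0) (c + 1) hdrop']
        simp [pvRef, hlt]

-- A equals the reference recursion on a nonempty list
lemma pvA_eq_ref (p : Int) (r ml : List Int) :
    trial_time_fixer (p :: r) ml = pvRef ml p r 0 0 := by
  have h := pvFoldA_ref (p :: r) ml r 0 p [] 0 0 (by simp)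
  simpa [trial_time_fixer] using h

lemma pvFirstReset_bounds (tl : List Int) (i : Int) (h : pvFirstReset tl = some i) :
    1 ≤ i ∧ i < (tl.length : Int) := by
  have hm := List.mem_of_find?_eq_some h
  exact (PySem.List.mem_pyRange_one).1 hm

lemma pvFirstReset_nil : pvFirstReset [] = none := rfl

lemma pvFirstReset_single (p : Int) : pvFirstReset [p] = none := by
  unfold pvFirstReset
  rw [show (([p] : List Int).length : Int) = 1 by simp, PySem.List.pyRange_one_eq_nil (by norm_num)]
  rfl

lemma pv_find?_congr {α : Type} (l : List α) (p q : α → Bool) (h : ∀ a ∈ l, p a = q a) :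
    l.find? p = l.find? q := by
  induction l with
  | nil => rfl
  | cons a l ih =>
      rw [List.find?_cons, List.find?_cons, h a (by simp)]
      cases q a
      · exact ih (fun b hb => h b (by simp [hb]))
      · rfl

-- structure of pvFirstReset on a two-or-more element list
lemma pvFirstReset_cons (p x : Int) (xs : List Int) :
    pvFirstReset (p :: x :: xs)
      = if x ≤ p then some 1 else Option.map (· + 1) (pvFirstReset (x :: xs)) := by
  unfold pvFirstReset
  have hlen : ((p :: x :: xs).length : Int) = ((x :: xs).length : Int) + 1 := by simp
  rw [hlen, PySem.List.pyRange_one_cons (show (1:Int) < ((x :: xs).length : Int) + 1 by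
    have := Int.natCast_pos.mpr (show 0 < (x :: xs).length by simp)
    omega)]
  rw [List.find?_cons]
  have h0 : PySem.List.pyGetD (p :: x :: xs) (1 : Int) 0 = x := by
    rw [show (1:Int) = ((1:Nat):Int) from rfl, PySem.List.pyGetD_natCast]; rfl
  have h1 : PySem.List.pyGetD (p :: x :: xs) ((1 : Int) - 1) 0 = p := by
    norm_num [PySem.List.pyGetD_zero_cons]
  rw [h0, h1]
  by_cases hle : x ≤ p
  · simp [hle]
  · simp only [hle, decide_false, if_false]
    have hmap : PySem.List.pyRange (1 + 1) (((x :: xs).length : Int) + 1) 1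
        = (PySem.List.pyRange 1 ((x :: xs).length : Int) 1).map (· + 1) := by
      rw [PySem.List.pyRange_one, PySem.List.pyRange_one]
      have he : (((x :: xs).length : Int) + 1 - (1 + 1)) = (((x :: xs).length : Int) - 1) := by ring
      rw [he, List.map_map]
      apply List.map_congr_left
      intro a _
      simp; ring
    rw [hmap, List.find?_map]
    have hpred : ∀ j ∈ PySem.List.pyRange 1 ((x :: xs).length : Int) 1,
        (decide (PySem.List.pyGetD (p :: x :: xs) (j + 1) 0 ≤ PySem.List.pyGetD (p :: x :: xs) (j + 1 - 1) 0))
          = (decide (PySem.List.pyGetD (x :: xs) j 0 ≤ PySem.List.pyGetD (x :: xs) (j - 1) 0)) := by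
      intro j hj
      obtain ⟨hj1, hj2⟩ := (PySem.List.mem_pyRange_one).1 hj
      have e1 : PySem.List.pyGetD (p :: x :: xs) (j + 1) 0 = PySem.List.pyGetD (x :: xs) j 0 := by
        have hc : j + 1 = ((j.toNat + 1 : Nat) : Int) := by omega
        have hc2 : j = ((j.toNat : Nat) : Int) := by omega
        rw [hc, PySem.List.pyGetD_natCast, hc2, PySem.List.pyGetD_natCast]
        simp [List.getD]
        congr 2
        omega
      have e2 : PySem.List.pyGetD (p :: x :: xs) (j + 1 - 1) 0 = PySem.List.pyGetD (x :: xs) (j - 1) 0 := by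
        have hj0 : 1 ≤ j.toNat := by omega
        have hc : j + 1 - 1 = (((j.toNat - 1) + 1 : Nat) : Int) := by omega
        have hc2 : j - 1 = (((j.toNat - 1) : Nat) : Int) := by omega
        rw [hc, PySem.List.pyGetD_natCast, hc2, PySem.List.pyGetD_natCast]
        simp [List.getD]
      rw [e1, e2]
    have hco : (fun i => decide (PySem.List.pyGetD (p :: x :: xs) i 0 ≤ PySem.List.pyGetD (p :: x :: xs) (i - 1) 0)) ∘ (· + 1)
        = fun j => decide (PySem.List.pyGetD (p :: x :: xs) (j + 1) 0 ≤ PySem.List.pyGetD (p :: x :: xs) (j + 1 - 1) 0) := by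
      funext j; rfl
    rw [hco, pv_find?_congr _ _ _ hpred]

lemma pvAltGo_none (f : Nat) (tl ml : List Int) (h : pvFirstReset tl = none) :
    pvAltGo f tl ml = tl := by
  cases f with
  | zero => rfl
  | succ f => simp [pvAltGo, h]

lemma pvAltGo_some (f : Nat) (tl ml : List Int) (i : Int) (h : pvFirstReset tl = some i) :
    pvAltGo (f + 1) tl ml
      = PySem.List.slice tl none (some i) ++
        (pvAltGo f (PySem.List.slice tl (some i) none)
            (PySem.List.slice ml (some 1) none)).map (· + PySem.List.pyGetD ml 0 0) := by
  simp [pvAltGo, h]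

-- the fuel does not matter once it covers the list length
lemma pvAltGo_fuel : ∀ (f f' : Nat) (tl ml : List Int), tl.length ≤ f → tl.length ≤ f' →
    pvAltGo f tl ml = pvAltGo f' tl ml := by
  intro f
  induction f with
  | zero =>
      intro f' tl ml h _
      have he : tl = [] := List.length_eq_zero_iff.mp (by omega)
      subst he
      rw [pvAltGo_none f' _ _ pvFirstReset_nil]
      rfl
  | succ f ih =>
      intro f' tl ml h h'
      cases f' with
      | zero =>
          have he : tl = [] := List.length_eq_zero_iff.mp (by omega)
          subst he
          rw [pvAltGo_none (f+1) _ _ pvFirstReset_nil]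
          rfl
      | succ f' =>
          cases hfs : pvFirstReset tl with
          | none => rw [pvAltGo_none, pvAltGo_none] <;> exact hfs
          | some i =>
              obtain ⟨h1, h2⟩ := pvFirstReset_bounds _ _ hfs
              rw [pvAltGo_some _ _ _ _ hfs, pvAltGo_some _ _ _ _ hfs]
              have hlen : (PySem.List.slice tl (some i) none).length ≤ tl.length - 1 := by
                rw [PySem.List.slice_from tl (show (0:Int) ≤ i by omega)]
                simp only [List.length_drop]
                omega
              rw [ih f' _ _ (by omega) (by omega)]

-- B equals the reference recursion on a nonempty list
lemma pvRef_eq_alt (r : List Int) : ∀ (p : Int) (ml : List Int) (f : Nat), r.length ≤ f →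
    pvRef ml p r 0 0 = pvAltGo (f + 1) (p :: r) ml := by
  induction r with
  | nil =>
      intro p ml f _
      rw [pvAltGo_none _ _ _ (pvFirstReset_single p)]
      simp [pvRef]
  | cons x xs ih =>
      intro p ml f hf
      obtain ⟨f0, rfl⟩ : ∃ f0, f = f0 + 1 := ⟨f - 1, by simp at hf; omega⟩
      have hf0 : xs.length ≤ f0 := by simp at hf; omega
      by_cases hle : x ≤ p
      · have hfr : pvFirstReset (p :: x :: xs) = some 1 := by
          rw [pvFirstReset_cons]; simp [hle]
        rw [pvAltGo_some _ _ _ _ hfr]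
        rw [PySem.List.slice_to (p :: x :: xs) (show (0:Int) ≤ 1 by norm_num)]
        rw [PySem.List.slice_from_one, PySem.List.slice_from_one]
        have hnl : ¬ p < x := by omega
        have hstep : pvRef ml p (x :: xs) 0 0
            = (p + 0) :: pvRef ml x xs (0 + PySem.List.pyGetD ml ((0:Nat):Int) 0) (0 + 1) := by
          rw [pvRef, if_neg hnl]
        rw [hstep, pvRef_shift, pvRef_counter, ih x ml.tail f0 hf0]
        simp [List.tail]
      · have hlt : p < x := by omega
        cases hfs : pvFirstReset (x :: xs) with
        | none =>
            have hfr : pvFirstReset (p :: x :: xs) = none := by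
              rw [pvFirstReset_cons]; simp [hle, hfs]
            rw [pvAltGo_none _ _ _ hfr]
            have h2 := pvAltGo_none (f0 + 1) (x :: xs) ml hfs
            have hstep : pvRef ml p (x :: xs) 0 0 = (p + 0) :: pvRef ml x xs 0 0 := by
              rw [pvRef, if_pos hlt]
            rw [hstep, ih x ml f0 hf0, h2]
            simp
        | some j =>
            obtain ⟨hj1, hj2⟩ := pvFirstReset_bounds _ _ hfs
            have hfr : pvFirstReset (p :: x :: xs) = some (j + 1) := by
              rw [pvFirstReset_cons]; simp [hle, hfs]
            rw [pvAltGo_some _ _ _ _ hfr]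
            have hstep : pvRef ml p (x :: xs) 0 0 = (p + 0) :: pvRef ml x xs 0 0 := by
              rw [pvRef, if_pos hlt]
            rw [hstep, ih x ml f0 hf0, pvAltGo_some _ _ _ _ hfs]
            rw [PySem.List.slice_to (p :: x :: xs) (show (0:Int) ≤ j + 1 by omega),
                PySem.List.slice_from (p :: x :: xs) (show (0:Int) ≤ j + 1 by omega),
                PySem.List.slice_to (x :: xs) (show (0:Int) ≤ j by omega),
                PySem.List.slice_from (x :: xs) (show (0:Int) ≤ j by omega)]
            have ht : (j + 1).toNat = j.toNat + 1 := by omega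
            rw [ht, List.take_succ_cons, List.drop_succ_cons]
            have hdl : ((x :: xs).drop j.toNat).length ≤ f0 := by
              simp only [List.length_drop]
              simp
              omega
            rw [pvAltGo_fuel f0 (f0 + 1) _ _ hdl (by omega)]
            simp

-- ===== VERDICT (by name: the statement is the Claim_ definition above) =====
theorem trial_time_fixer_spec : Claim_equal_trial_time_fixer := by
  intro tl ml _ hpre
  unfold Spec_trial_time_fixer
  obtain ⟨hne, -⟩ := hpre
  obtain ⟨p, r, rfl⟩ : ∃ p r, tl = p :: r := by
    cases tl with
    | nil => exact absurd rfl hne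
    | cons p r => exact ⟨p, r, rfl⟩
  rw [pvA_eq_ref, pvRef_eq_alt r p ml r.length le_rfl]
  rfl
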